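-- pv_equiv track=rewrite | github.com/MainvilleOwen/420-SF1-RE | TIleOperationFunctions.py | TileDrawOrder
-- ===== SOURCE A (Python) =====
-- def TileDrawOrder(tileMap):
--     zMaxIndex, yMaxIndex, xMaxIndex = (len(tileMap)-1), (len(tileMap[0])-1), (len(tileMap[0][0])-1)
--     returnedTiles = []
--     totalNum = 0
--     while totalNum <= (zMaxIndex + yMaxIndex + xMaxIndex):
--
--         refCoords = [0, 0, 0]
--         refCoords[2] = totalNum
--         if refCoords[2] > zMaxIndex:
--             refCoords[1] = refCoords[2] - zMaxIndex
--             refCoords[2] -= refCoords[1]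
--             if refCoords[1] > yMaxIndex:
--                 refCoords[0] = refCoords[1] - yMaxIndex
--                 refCoords[1] -= refCoords[0]
--         x,y,z = refCoords[0], refCoords[1], refCoords[2]
--     # The loop stops when totalNum is greater then the max these 3 values can be, youll never have an X too big to index
--         counter = 0
--
--
--         while (z >= 0) and ((x + y + z) <= totalNum):
--
--             while (y >= 0) and (x <= xMaxIndex):
--                 tile = tileMap[z][y][x]
--                 if tile:
--                     returnedTiles.append((x, y, z))
--                 x += 1
--                 y -= 1
--             counter += 1
--             x,y = (refCoords[0]), (refCoords[1] + counter)
--             if y > yMaxIndex: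
--                 diff = y - yMaxIndex
--                 y -= diff
--                 x += diff
--             z -= 1
--         totalNum += 1
--     return(returnedTiles)
-- ===== SOURCE B (Python) =====
-- def TileDrawOrder(tileMap):
--     zCount, yCount, xCount = len(tileMap), len(tileMap[0]), len(tileMap[0][0])
--     tiles = [(x, y, z)
--              for z in range(zCount)
--              for y in range(yCount)
--              for x in range(xCount)
--              if tileMap[z][y][x]]
--     tiles.sort(key=lambda t: (t[0] + t[1] + t[2], -t[2], t[0]))
--     return tiles
-- ===== Notes on version B (the rewrite author's own statement) =====
-- stated objective: simpler
-- what changed: Replaces A's hand-rolled diagonal sweep (nested while loops with mutable refCoords, counter and clipping arithmetic) by one plain triple scan that collects the non-empty cells followed by a single stable sort with key (x+y+z, -z, x), which is exactly A's emission order.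
import Mathlib
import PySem

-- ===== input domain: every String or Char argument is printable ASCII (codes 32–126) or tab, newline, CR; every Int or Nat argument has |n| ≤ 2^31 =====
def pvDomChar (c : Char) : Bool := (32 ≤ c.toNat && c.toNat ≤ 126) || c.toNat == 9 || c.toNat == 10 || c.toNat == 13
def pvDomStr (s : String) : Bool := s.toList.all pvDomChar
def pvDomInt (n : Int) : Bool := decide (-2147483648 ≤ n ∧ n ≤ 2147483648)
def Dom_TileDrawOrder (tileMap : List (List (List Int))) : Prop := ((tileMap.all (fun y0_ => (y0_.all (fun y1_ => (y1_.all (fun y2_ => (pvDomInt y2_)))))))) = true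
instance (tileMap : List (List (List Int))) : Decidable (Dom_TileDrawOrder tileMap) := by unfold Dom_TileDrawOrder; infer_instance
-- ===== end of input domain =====

-- B replaces A's hand-rolled diagonal sweep by collect-all-non-empty-cells + one sort
-- with key (x+y+z, -z, x) (simpler); equivalence is proved on Pre_ (see below).

-- ===== PORT A =====

-- tileMap[z][y][x] (helper shared by both ports); exact under Pre_TileDrawOrder: every
-- index either port actually uses is in range there
def pvCellA (tm : List (List (List Int))) (z y x : Int) : Int :=
  PySem.List.pyGetD (PySem.List.pyGetD (PySem.List.pyGetD tm z []) y []) x 0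

-- the innermost 'while (y >= 0) and (x <= xMaxIndex)' loop
def pvInnerA (tm : List (List (List Int))) (xMax : Int) (x y z : Int)
    (acc : List (Int × Int × Int)) : List (Int × Int × Int) :=
  if _h : 0 ≤ y ∧ x ≤ xMax then
    let tile := pvCellA tm z y x
    let acc' := if tile ≠ 0 then acc ++ [(x, y, z)] else acc
    pvInnerA tm xMax (x + 1) (y - 1) z acc'
  else acc
termination_by (y + 1).toNat
decreasing_by omega

-- the middle 'while (z >= 0) and ((x + y + z) <= totalNum)' loop
def pvMidA (tm : List (List (List Int))) (yMax xMax refx refy totalNum : Int)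
    (x y z counter : Int) (acc : List (Int × Int × Int)) : List (Int × Int × Int) :=
  if _h : 0 ≤ z ∧ x + y + z ≤ totalNum then
    let acc' := pvInnerA tm xMax x y z acc
    let counter' := counter + 1
    let x' := refx
    let y' := refy + counter'
    let p := if y' > yMax then (x' + (y' - yMax), y' - (y' - yMax)) else (x', y')
    pvMidA tm yMax xMax refx refy totalNum p.1 p.2 (z - 1) counter' acc'
  else acc
termination_by (z + 1).toNat
decreasing_by omega

-- the outer 'while totalNum <= (zMaxIndex + yMaxIndex + xMaxIndex)' loop
def pvOuterA (tm : List (List (List Int))) (zMax yMax xMax totalNum : Int)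
    (acc : List (Int × Int × Int)) : List (Int × Int × Int) :=
  if _h : totalNum ≤ zMax + yMax + xMax then
    let r2 := totalNum
    let r : Int × Int × Int :=
      if r2 > zMax then
        let r1 := r2 - zMax
        let r2' := r2 - r1
        if r1 > yMax then
          let r0 := r1 - yMax
          (r0, r1 - r0, r2')
        else (0, r1, r2')
      else (0, 0, r2)
    let acc' := pvMidA tm yMax xMax r.1 r.2.1 totalNum r.1 r.2.1 r.2.2 0 acc
    pvOuterA tm zMax yMax xMax (totalNum + 1) acc'
  else acc
termination_by (zMax + yMax + xMax - totalNum + 1).toNat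
decreasing_by omega

def TileDrawOrder (tileMap : List (List (List Int))) : List (Int × Int × Int) :=
  let zMax := (tileMap.length : Int) - 1
  let yMax := ((PySem.List.pyGetD tileMap 0 []).length : Int) - 1
  let xMax := ((PySem.List.pyGetD (PySem.List.pyGetD tileMap 0 []) 0 []).length : Int) - 1
  pvOuterA tileMap zMax yMax xMax 0 []

-- ===== PORT B =====

-- Python's tuple key (x+y+z, -z, x); ported via the lexicographic product ×ₗ,
-- exact because Python compares tuples lexicographically
def pvKeyB (t : Int × Int × Int) : Lex (Int × Lex (Int × Int)) :=
  toLex (t.1 + t.2.1 + t.2.2, toLex (-t.2.2, t.1))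

-- the triple list comprehension of Source B
def pvCollectB (tm : List (List (List Int))) (zC yC xC : Int) : List (Int × Int × Int) :=
  (PySem.List.pyRange 0 zC 1).flatMap (fun z =>
    (PySem.List.pyRange 0 yC 1).flatMap (fun y =>
      (PySem.List.pyRange 0 xC 1).filterMap (fun x =>
        if pvCellA tm z y x ≠ 0 then some (x, y, z) else none)))

def TileDrawOrder_alt (tileMap : List (List (List Int))) : List (Int × Int × Int) :=
  let zC := (tileMap.length : Int)
  let yC := ((PySem.List.pyGetD tileMap 0 []).length : Int)
  let xC := ((PySem.List.pyGetD (PySem.List.pyGetD tileMap 0 []) 0 []).length : Int)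
  PySem.List.sorted (pvCollectB tileMap zC yC xC) pvKeyB

-- ===== PRECONDITION & SPEC =====
-- Pre_ excludes exactly the inputs on which the Python A raises IndexError: the empty map,
-- a map whose first plane is empty, and (when the first row is non-empty) maps missing some
-- cell of the box spanned by the first plane's dimensions; A returns on every other input.
def Pre_TileDrawOrder (tileMap : List (List (List Int))) : Prop :=
  tileMap ≠ [] ∧ tileMap.headD [] ≠ [] ∧
  (((tileMap.headD []).headD []).length = 0 ∨
    ∀ p ∈ tileMap, (tileMap.headD []).length ≤ p.length ∧
      ∀ r ∈ p.take (tileMap.headD []).length, ((tileMap.headD []).headD []).length ≤ r.length)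
instance (tileMap : List (List (List Int))) : Decidable (Pre_TileDrawOrder tileMap) := by
  unfold Pre_TileDrawOrder; infer_instance

def pvWitness_TileDrawOrder : List (List (List Int)) := [[[1]]]

def Spec_TileDrawOrder (tileMap : List (List (List Int))) (out : List (Int × Int × Int)) : Prop := out = TileDrawOrder_alt tileMap
instance (tileMap : List (List (List Int))) (out : List (Int × Int × Int)) : Decidable (Spec_TileDrawOrder tileMap out) := by unfold Spec_TileDrawOrder; infer_instance

-- ===== CLAIM (what is proved, stated in full; the proofs are below) =====
def Claim_equal_TileDrawOrder : Prop := ∀ (tileMap : List (List (List Int))), Dom_TileDrawOrder tileMap → Pre_TileDrawOrder tileMap → Spec_TileDrawOrder tileMap (TileDrawOrder tileMap)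

-- ===== LEMMAS AND PROOFS =====

-- The common description of the output: for each diagonal sum s (ascending), for each
-- z (descending), the non-empty cells (x, s-z-x, z) with x ascending.
def pvDiag (tm : List (List (List Int))) (yMax xMax s z : Int) : List (Int × Int × Int) :=
  (PySem.List.pyRange (max 0 (s - z - yMax)) (min xMax (s - z) + 1) 1).filterMap
    (fun x => if pvCellA tm z (s - z - x) x ≠ 0 then some (x, s - z - x, z) else none)

def pvM (tm : List (List (List Int))) (zMax yMax xMax : Int) : List (Int × Int × Int) :=
  (PySem.List.pyRange 0 (zMax + yMax + xMax + 1) 1).flatMap (fun s =>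
    (PySem.List.pyRange (min s zMax) (-1) (-1)).flatMap (fun z => pvDiag tm yMax xMax s z))

theorem pvInnerA_eq (tm : List (List (List Int))) (xMax : Int) :
    ∀ (x y z : Int) (acc : List (Int × Int × Int)),
    pvInnerA tm xMax x y z acc =
      acc ++ (PySem.List.pyRange x (min xMax (x + y) + 1) 1).filterMap
        (fun x' => if pvCellA tm z (x + y - x') x' ≠ 0 then some (x', x + y - x', z) else none) := by
  intro x y z acc
  fun_induction pvInnerA tm xMax x y z acc with
  | case1 a b c d e f g =>
    have hab : a + 1 + (b - 1) = a + b := by ring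
    rw [g]
    simp only [hab] at *
    rw [show PySem.List.pyRange a (min xMax (a+b)+1) 1 = a :: PySem.List.pyRange (a+1) (min xMax (a+b)+1) 1 from PySem.List.pyRange_one_cons (by omega)]
    have hba : a + b - a = b := by ring
    by_cases hc : pvCellA tm z b a = 0 <;>
      simp [f, e, hc, hba]
  | case2 a b c d =>
    have hnil : PySem.List.pyRange a (min xMax (a + b) + 1) 1 = [] :=
      PySem.List.pyRange_one_eq_nil (by omega)
    simp [hnil]

theorem pvMidA_eq (tm : List (List (List Int))) (yMax xMax x0 y0 s : Int)
    (_hy0 : 0 ≤ y0) (hy0M : y0 ≤ yMax) (hx0 : 0 ≤ x0) :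
    ∀ (z x y counter : Int) (acc : List (Int × Int × Int)),
    0 ≤ counter →
    x0 + y0 + z + counter = s →
    (x0 = 0 ∨ x0 + yMax + z + counter ≤ s) →
    x = max x0 (s - z - yMax) →
    y = s - z - x →
    pvMidA tm yMax xMax x0 y0 s x y z counter acc =
      acc ++ (PySem.List.pyRange z (-1) (-1)).flatMap (fun z' => pvDiag tm yMax xMax s z') := by
  intro z
  induction' hn : (z + 1).toNat using Nat.strong_induction_on with n ih generalizing z
  intro x y counter acc h0 h1 h2 h3 h4
  by_cases hz : 0 ≤ z
  · rw [pvMidA, dif_pos ⟨hz, by omega⟩]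
    rw [ih z.toNat (by omega) (z - 1) (by omega)
      (if y0 + (counter + 1) > yMax then (x0 + (y0 + (counter + 1) - yMax), y0 + (counter + 1) - (y0 + (counter + 1) - yMax)) else (x0, y0 + (counter + 1))).1
      (if y0 + (counter + 1) > yMax then (x0 + (y0 + (counter + 1) - yMax), y0 + (counter + 1) - (y0 + (counter + 1) - yMax)) else (x0, y0 + (counter + 1))).2
      (counter + 1) _ (by omega) (by omega) (by omega)
      (by split <;> simp <;> omega) (by split <;> simp <;> omega)]
    rw [pvInnerA_eq]
    rw [show PySem.List.pyRange z (-1) (-1) = z :: PySem.List.pyRange (z - 1) (-1) (-1) from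
      PySem.List.pyRange_neg_one_cons (by omega)]
    simp only [List.flatMap_cons, List.append_assoc]
    congr 1
    rw [pvDiag]
    have e1 : x + y = s - z := by omega
    have e2 : x = max 0 (s - z - yMax) := by omega
    simp only [e1]
    rw [e2]
  · rw [pvMidA, dif_neg (by omega)]
    rw [show PySem.List.pyRange z (-1) (-1) = [] from PySem.List.pyRange_neg_one_eq_nil (by omega)]
    simp

theorem pvOuterA_eq (tm : List (List (List Int))) (zMax yMax xMax : Int)
    (hz : 0 ≤ zMax) (hy : 0 ≤ yMax) :
    ∀ (s : Int) (acc : List (Int × Int × Int)), 0 ≤ s →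
    pvOuterA tm zMax yMax xMax s acc =
      acc ++ (PySem.List.pyRange s (zMax + yMax + xMax + 1) 1).flatMap (fun s' =>
        (PySem.List.pyRange (min s' zMax) (-1) (-1)).flatMap (fun z => pvDiag tm yMax xMax s' z)) := by
  intro s
  induction' hn : (zMax + yMax + xMax + 1 - s).toNat using Nat.strong_induction_on with n ih generalizing s
  intro acc hs
  by_cases hle : s ≤ zMax + yMax + xMax
  · rw [pvOuterA, dif_pos hle]
    have hcons : PySem.List.pyRange s (zMax + yMax + xMax + 1) 1
        = s :: PySem.List.pyRange (s + 1) (zMax + yMax + xMax + 1) 1 :=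
      PySem.List.pyRange_one_cons (by omega)
    dsimp only
    split_ifs with hA hB
    · simp only
      rw [pvMidA_eq tm yMax xMax (s - zMax - yMax) (s - zMax - (s - zMax - yMax)) s
          (by omega) (by omega) (by omega) (s - (s - zMax)) _ _ 0 acc
          (by omega) (by omega) (by omega) (by omega) (by omega)]
      rw [ih (zMax + yMax + xMax + 1 - (s + 1)).toNat (by omega) (s + 1) (by omega) _ (by omega)]
      rw [hcons]
      have hmz : s - (s - zMax) = min s zMax := by omega
      simp [hmz, List.flatMap_cons, List.append_assoc]
    · simp only
      rw [pvMidA_eq tm yMax xMax 0 (s - zMax) s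
          (by omega) (by omega) (by omega) (s - (s - zMax)) _ _ 0 acc
          (by omega) (by omega) (by omega) (by omega) (by omega)]
      rw [ih (zMax + yMax + xMax + 1 - (s + 1)).toNat (by omega) (s + 1) (by omega) _ (by omega)]
      rw [hcons]
      have hmz : s - (s - zMax) = min s zMax := by omega
      simp [hmz, List.flatMap_cons, List.append_assoc]
    · simp only
      rw [pvMidA_eq tm yMax xMax 0 0 s
          (by omega) (by omega) (by omega) s _ _ 0 acc
          (by omega) (by omega) (by omega) (by omega) (by omega)]
      rw [ih (zMax + yMax + xMax + 1 - (s + 1)).toNat (by omega) (s + 1) (by omega) _ (by omega)]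
      rw [hcons]
      have hmz : s = min s zMax := by omega
      simp only [List.flatMap_cons, List.append_assoc]
      rw [← hmz]
  · rw [pvOuterA, dif_neg (by omega)]
    rw [show PySem.List.pyRange s (zMax + yMax + xMax + 1) 1 = [] from
      PySem.List.pyRange_one_eq_nil (by omega)]
    simp

theorem pvMem_pvDiag (tm : List (List (List Int))) (yMax xMax s z : Int)
    (t : Int × Int × Int) :
    t ∈ pvDiag tm yMax xMax s z ↔
      0 ≤ t.1 ∧ t.1 ≤ xMax ∧ 0 ≤ t.2.1 ∧ t.2.1 ≤ yMax ∧ t.2.2 = z ∧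
        t.1 + t.2.1 + t.2.2 = s ∧ pvCellA tm t.2.2 t.2.1 t.1 ≠ 0 := by
  obtain ⟨x, y, z'⟩ := t
  simp only [pvDiag, List.mem_filterMap, PySem.List.mem_pyRange_one]
  constructor
  · rintro ⟨x', ⟨ha, hb⟩, hc⟩
    by_cases hcell : pvCellA tm z (s - z - x') x' = 0
    · simp [hcell] at hc
    · simp only [hcell, ne_eq, not_false_iff, if_true, Option.some.injEq,
        Prod.mk.injEq] at hc
      obtain ⟨rfl, rfl, rfl⟩ := hc
      exact ⟨by omega, by omega, by omega, by omega, rfl, by omega, hcell⟩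
  · rintro ⟨h1, h2, h3, h4, h5, h6, h7⟩
    refine ⟨x, ⟨by omega, by omega⟩, ?_⟩
    have hy : s - z - x = y := by omega
    rw [hy, ← h5]
    simp [h7]

theorem pvMem_pvM (tm : List (List (List Int))) (zMax yMax xMax : Int)
    (t : Int × Int × Int) :
    t ∈ pvM tm zMax yMax xMax ↔
      0 ≤ t.1 ∧ t.1 ≤ xMax ∧ 0 ≤ t.2.1 ∧ t.2.1 ≤ yMax ∧ 0 ≤ t.2.2 ∧ t.2.2 ≤ zMax ∧
        pvCellA tm t.2.2 t.2.1 t.1 ≠ 0 := by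
  obtain ⟨x, y, z⟩ := t
  simp only [pvM, List.mem_flatMap, PySem.List.mem_pyRange_one,
    PySem.List.mem_pyRange_neg_one]
  constructor
  · rintro ⟨s, ⟨hs0, hs1⟩, z', ⟨hz0, hz1⟩, hm⟩
    rw [pvMem_pvDiag] at hm
    obtain ⟨m1, m2, m3, m4, m5, m6, m7⟩ := hm
    simp only at m5 m6 m7 ⊢
    subst m5
    exact ⟨m1, m2, m3, m4, by omega, by omega, m7⟩
  · rintro ⟨h1, h2, h3, h4, h5, h6, h7⟩
    refine ⟨x + y + z, ⟨by omega, by omega⟩, z, ⟨by omega, by omega⟩, ?_⟩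
    rw [pvMem_pvDiag]
    exact ⟨h1, h2, h3, h4, rfl, rfl, h7⟩

theorem pvMem_pvCollectB (tm : List (List (List Int))) (zC yC xC : Int)
    (t : Int × Int × Int) :
    t ∈ pvCollectB tm zC yC xC ↔
      0 ≤ t.1 ∧ t.1 < xC ∧ 0 ≤ t.2.1 ∧ t.2.1 < yC ∧ 0 ≤ t.2.2 ∧ t.2.2 < zC ∧
        pvCellA tm t.2.2 t.2.1 t.1 ≠ 0 := by
  obtain ⟨x, y, z⟩ := t
  simp only [pvCollectB, List.mem_flatMap, List.mem_filterMap,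
    PySem.List.mem_pyRange_one]
  constructor
  · rintro ⟨z', ⟨hz0, hz1⟩, y', ⟨hy0, hy1⟩, x', ⟨hx0, hx1⟩, hc⟩
    by_cases hcell : pvCellA tm z' y' x' = 0
    · simp [hcell] at hc
    · simp only [hcell, ne_eq, not_false_iff, if_true, Option.some.injEq,
        Prod.mk.injEq] at hc
      obtain ⟨rfl, rfl, rfl⟩ := hc
      exact ⟨by omega, by omega, by omega, by omega, by omega, by omega, hcell⟩
  · rintro ⟨h1, h2, h3, h4, h5, h6, h7⟩
    refine ⟨z, ⟨by omega, by omega⟩, y, ⟨by omega, by omega⟩, x, ⟨by omega, by omega⟩, ?_⟩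
    simp [h7]


theorem pvCountdown_pairwise_gt (a b : Int) :
    (PySem.List.pyRange a b (-1)).Pairwise (fun p q => q < p) := by
  rw [PySem.List.pyRange_neg_one_eq_reverse, List.pairwise_reverse]
  exact PySem.List.pairwise_lt_pyRange_one _ _

theorem pvM_pairwise (tm : List (List (List Int))) (zMax yMax xMax : Int) :
    (pvM tm zMax yMax xMax).Pairwise (fun a b => pvKeyB a < pvKeyB b) := by
  rw [pvM, List.pairwise_flatMap]
  constructor
  · intro s hs
    rw [List.pairwise_flatMap]
    constructor
    · intro z hz
      rw [pvDiag, List.pairwise_filterMap]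
      refine List.Pairwise.imp ?_ (PySem.List.pairwise_lt_pyRange_one _ _)
      intro a b hab b1 h1 b2 h2
      by_cases c1 : pvCellA tm z (s - z - a) a = 0
      · simp [c1] at h1
      · simp only [c1, ne_eq, not_false_iff, if_true, Option.some.injEq] at h1
        by_cases c2 : pvCellA tm z (s - z - b) b = 0
        · simp [c2] at h2
        · simp only [c2, ne_eq, not_false_iff, if_true, Option.some.injEq] at h2
          subst h1; subst h2
          simp only [pvKeyB, Prod.Lex.toLex_lt_toLex]
          try simp only [true_and]
          omega
    · refine List.Pairwise.imp ?_ (pvCountdown_pairwise_gt _ _)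
      intro z1 z2 h t1 ht1 t2 ht2
      rw [pvMem_pvDiag] at ht1 ht2
      obtain ⟨-, -, -, -, e1, e2, -⟩ := ht1
      obtain ⟨-, -, -, -, f1, f2, -⟩ := ht2
      simp only [pvKeyB, Prod.Lex.toLex_lt_toLex]
      omega
  · refine List.Pairwise.imp ?_ (PySem.List.pairwise_lt_pyRange_one _ _)
    intro s1 s2 h t1 ht1 t2 ht2
    rw [List.mem_flatMap] at ht1 ht2
    obtain ⟨z1, -, hm1⟩ := ht1
    obtain ⟨z2, -, hm2⟩ := ht2
    rw [pvMem_pvDiag] at hm1 hm2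
    obtain ⟨-, -, -, -, -, e2, -⟩ := hm1
    obtain ⟨-, -, -, -, -, f2, -⟩ := hm2
    simp only [pvKeyB, Prod.Lex.toLex_lt_toLex]
    omega

theorem pvCollectB_pairwise (tm : List (List (List Int))) (zC yC xC : Int) :
    (pvCollectB tm zC yC xC).Pairwise
      (fun a b => toLex (a.2.2, toLex (a.2.1, a.1)) < toLex (b.2.2, toLex (b.2.1, b.1))) := by
  rw [pvCollectB, List.pairwise_flatMap]
  constructor
  · intro z hz
    rw [List.pairwise_flatMap]
    constructor
    · intro y hy
      rw [List.pairwise_filterMap]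
      refine List.Pairwise.imp ?_ (PySem.List.pairwise_lt_pyRange_one _ _)
      intro a b hab b1 h1 b2 h2
      by_cases c1 : pvCellA tm z y a = 0
      · simp [c1] at h1
      · simp only [c1, ne_eq, not_false_iff, if_true, Option.some.injEq] at h1
        by_cases c2 : pvCellA tm z y b = 0
        · simp [c2] at h2
        · simp only [c2, ne_eq, not_false_iff, if_true, Option.some.injEq] at h2
          subst h1; subst h2
          simp only [Prod.Lex.toLex_lt_toLex]
          try simp only [true_and]
          omega
    · refine List.Pairwise.imp ?_ (PySem.List.pairwise_lt_pyRange_one _ _)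
      intro y1 y2 h t1 ht1 t2 ht2
      rw [List.mem_filterMap] at ht1 ht2
      obtain ⟨x1, -, hm1⟩ := ht1
      obtain ⟨x2, -, hm2⟩ := ht2
      by_cases c1 : pvCellA tm z y1 x1 = 0
      · simp [c1] at hm1
      · simp only [c1, ne_eq, not_false_iff, if_true, Option.some.injEq] at hm1
        by_cases c2 : pvCellA tm z y2 x2 = 0
        · simp [c2] at hm2
        · simp only [c2, ne_eq, not_false_iff, if_true, Option.some.injEq] at hm2
          subst hm1; subst hm2
          simp only [Prod.Lex.toLex_lt_toLex]
          try simp only [true_and]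
          omega
  · refine List.Pairwise.imp ?_ (PySem.List.pairwise_lt_pyRange_one _ _)
    intro z1 z2 h t1 ht1 t2 ht2
    rw [List.mem_flatMap] at ht1 ht2
    obtain ⟨y1, -, hm1⟩ := ht1
    obtain ⟨y2, -, hm2⟩ := ht2
    rw [List.mem_filterMap] at hm1 hm2
    obtain ⟨x1, -, hx1⟩ := hm1
    obtain ⟨x2, -, hx2⟩ := hm2
    by_cases c1 : pvCellA tm z1 y1 x1 = 0
    · simp [c1] at hx1
    · simp only [c1, ne_eq, not_false_iff, if_true, Option.some.injEq] at hx1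
      by_cases c2 : pvCellA tm z2 y2 x2 = 0
      · simp [c2] at hx2
      · simp only [c2, ne_eq, not_false_iff, if_true, Option.some.injEq] at hx2
        subst hx1; subst hx2
        simp only [Prod.Lex.toLex_lt_toLex]
        try simp only [true_and]
        omega

theorem pvM_nodup (tm : List (List (List Int))) (zMax yMax xMax : Int) :
    (pvM tm zMax yMax xMax).Nodup := by
  refine List.Pairwise.imp ?_ (pvM_pairwise tm zMax yMax xMax)
  intro a b h
  exact fun he => absurd h (by simp [he])

theorem pvCollectB_nodup (tm : List (List (List Int))) (zC yC xC : Int) :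
    (pvCollectB tm zC yC xC).Nodup := by
  refine List.Pairwise.imp ?_ (pvCollectB_pairwise tm zC yC xC)
  intro a b h
  exact fun he => absurd h (by simp [he])

theorem pvM_perm (tm : List (List (List Int))) (zMax yMax xMax : Int) :
    (pvM tm zMax yMax xMax).Perm (pvCollectB tm (zMax + 1) (yMax + 1) (xMax + 1)) := by
  rw [List.perm_ext_iff_of_nodup (pvM_nodup tm zMax yMax xMax) (pvCollectB_nodup tm _ _ _)]
  intro t
  rw [pvMem_pvM, pvMem_pvCollectB]
  constructor <;> (rintro ⟨h1, h2, h3, h4, h5, h6, h7⟩; refine ⟨by omega, by omega, by omega, by omega, by omega, by omega, h7⟩)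

theorem pvA_eq_pvM (tm : List (List (List Int))) (h : Pre_TileDrawOrder tm) :
    TileDrawOrder tm = pvM tm ((tm.length : Int) - 1)
      (((tm.headD []).length : Int) - 1) ((((tm.headD []).headD []).length : Int) - 1) := by
  obtain ⟨h1, h2, -⟩ := h
  have hh : PySem.List.pyGetD tm 0 ([] : List (List Int)) = tm.headD [] := by
    cases tm with
    | nil => simp at h1
    | cons a l => simp [PySem.List.pyGetD_zero]
  have hz : 1 ≤ tm.length := List.length_pos_iff.mpr h1
  have hy : 1 ≤ (tm.headD []).length := List.length_pos_iff.mpr h2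
  have hh2 : PySem.List.pyGetD (tm.headD []) 0 ([] : List Int) = (tm.headD []).headD [] := by
    cases h : tm.headD [] with
    | nil => simp at h2 h ⊢; simp [h] at h2
    | cons a l => simp [PySem.List.pyGetD_zero]
  show pvOuterA tm _ _ _ 0 [] = _
  rw [hh, hh2]
  rw [pvOuterA_eq tm _ _ _ (by omega) (by omega) 0 [] le_rfl]
  rw [pvM, List.nil_append]

theorem pvB_eq_pvM (tm : List (List (List Int))) :
    TileDrawOrder_alt tm = pvM tm ((tm.length : Int) - 1)
      (((tm.headD []).length : Int) - 1) ((((tm.headD []).headD []).length : Int) - 1) := by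
  have hh : PySem.List.pyGetD tm 0 ([] : List (List Int)) = tm.headD [] := by
    cases tm with
    | nil => simp [PySem.List.pyGetD, PySem.List.pyGet?]
    | cons a l => simp [PySem.List.pyGetD_zero]
  have hh2 : PySem.List.pyGetD (tm.headD []) 0 ([] : List Int) = (tm.headD []).headD [] := by
    cases tm.headD [] with
    | nil => simp [PySem.List.pyGetD, PySem.List.pyGet?]
    | cons a l => simp [PySem.List.pyGetD_zero]
  show PySem.List.sorted (pvCollectB tm _ _ _) pvKeyB = _
  rw [hh, hh2]
  refine PySem.List.sorted_eq_of_perm_of_pairwise_lt _ _ pvKeyB ?_ (pvM_pairwise tm _ _ _)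
  have := pvM_perm tm ((tm.length : Int) - 1) (((tm.headD []).length : Int) - 1)
    ((((tm.headD []).headD []).length : Int) - 1)
  simpa using this

-- ===== VERDICT (by name: the statement is the Claim_ definition above) =====
theorem TileDrawOrder_spec : Claim_equal_TileDrawOrder := by
  intro tm _ hpre
  unfold Spec_TileDrawOrder
  rw [pvA_eq_pvM tm hpre, pvB_eq_pvM tm]
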